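-- pv_equiv track=rewrite | github.com/Yoonyesol/CodingTest | [프로그래머스] 연습문제_덧칠하기.py | solution
-- ===== SOURCE A (Python) =====
-- def solution(n, m, section):
--     answer = 0
--     while section:
--         e = section[0]
--         while section and e <= section[0] < e+m:
--             section.pop(0)
--         answer+=1
--     return answer
-- ===== SOURCE B (Python) =====
-- def solution(n, m, section):
--     answer = 0
--     start = None
--     for s in section:
--         if start is None or not (start <= s < start + m):
--             start = s
--             answer += 1
--     return answer
-- ===== Notes on version B (the rewrite author's own statement) =====
-- stated objective: faster
-- what changed: Replaces the nested while loops with O(n^2) list.pop(0) by a single pass over the list that tracks the start of the current painted segment.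
import Mathlib
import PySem

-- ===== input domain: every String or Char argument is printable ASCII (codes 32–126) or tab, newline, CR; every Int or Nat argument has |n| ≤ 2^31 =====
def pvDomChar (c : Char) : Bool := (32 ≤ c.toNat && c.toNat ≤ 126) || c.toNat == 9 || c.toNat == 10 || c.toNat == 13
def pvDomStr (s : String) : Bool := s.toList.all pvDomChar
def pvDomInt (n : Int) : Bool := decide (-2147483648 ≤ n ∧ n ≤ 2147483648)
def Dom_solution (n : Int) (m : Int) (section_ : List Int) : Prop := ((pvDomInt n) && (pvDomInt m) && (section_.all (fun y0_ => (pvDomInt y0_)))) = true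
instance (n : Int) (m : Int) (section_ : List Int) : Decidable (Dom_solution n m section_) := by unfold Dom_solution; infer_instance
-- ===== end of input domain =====

-- B replaces A's nested while loops with quadratic pop(0) by one O(n) pass tracking the
-- current segment start. Note: A empties the list argument in place; B does not mutate it
-- (equivalence here is about the return value only).

-- ===== PORT A =====
-- inner while: pop elements x with e ≤ x < e+m
def dropRunA (e m : Int) : List Int → List Int
  | [] => []
  | x :: xs => if e ≤ x ∧ x < e + m then dropRunA e m xs else x :: xs

theorem dropRunA_length_le (e m : Int) : ∀ l : List Int, (dropRunA e m l).length ≤ l.length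
  | [] => le_refl _
  | x :: xs => by
    simp only [dropRunA]
    split
    · exact le_trans (dropRunA_length_le e m xs) (Nat.le_succ _)
    · exact le_refl _

-- outer while; when 0 < m the head e is always popped by the inner loop (e ≤ e < e+m).
-- The 'if 0 < m' guard only ensures totality: Python A diverges when m ≤ 0 and the list
-- is nonempty (excluded by Pre_solution below).
def solGoA (m : Int) : List Int → Int
  | [] => 0
  | e :: rest =>
    if 0 < m then solGoA m (dropRunA e m rest) + 1 else 1
  termination_by l => l.length
  decreasing_by exact Nat.lt_succ_of_le (dropRunA_length_le e m rest)

def solution (n : Int) (m : Int) (section_ : List Int) : Int := solGoA m section_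

-- ===== PORT B =====
def stepB (m : Int) (st : Int × Option Int) (s : Int) : Int × Option Int :=
  match st.2 with
  | none => (st.1 + 1, some s)
  | some p => if p ≤ s ∧ s < p + m then st else (st.1 + 1, some s)

def solution_alt (n : Int) (m : Int) (section_ : List Int) : Int :=
  (section_.foldl (stepB m) (0, none)).1

-- ===== PRECONDITION & SPEC =====
-- Pre_ excludes only inputs on which Python A never returns: with m ≤ 0 and a nonempty
-- list the inner while pops nothing, so A loops forever.
def Pre_solution (n : Int) (m : Int) (section_ : List Int) : Prop := section_ = [] ∨ 0 < m
instance (n : Int) (m : Int) (section_ : List Int) : Decidable (Pre_solution n m section_) := by unfold Pre_solution; infer_instance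
def pvWitness_solution : Int × Int × List Int := (8, 3, [1, 2, 4, 7])
def Spec_solution (n : Int) (m : Int) (section_ : List Int) (out : Int) : Prop := out = solution_alt n m section_
instance (n : Int) (m : Int) (section_ : List Int) (out : Int) : Decidable (Spec_solution n m section_ out) := by unfold Spec_solution; infer_instance

-- ===== CLAIM (what is proved, stated in full; the proofs are below) =====
def Claim_equal_solution : Prop := ∀ (n : Int) (m : Int) (section_ : List Int), Dom_solution n m section_ → Pre_solution n m section_ → Spec_solution n m section_ (solution n m section_)

-- ===== LEMMAS AND PROOFS =====
-- Invariant: from state (a, some e), B's fold first skips exactly the elements A's inner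
-- loop pops, then both restart at the first element outside [e, e+m).
theorem foldB_some (m : Int) (hm : 0 < m) :
    ∀ (l : List Int) (a e : Int),
      (l.foldl (stepB m) (a, some e)).1 = a + solGoA m (dropRunA e m l)
  | [], a, e => by simp [dropRunA, solGoA]
  | x :: xs, a, e => by
    by_cases h : e ≤ x ∧ x < e + m
    · simp only [List.foldl_cons, stepB, h, if_pos h, dropRunA]
      exact foldB_some m hm xs a e
    · simp only [List.foldl_cons, stepB, if_neg h, dropRunA]
      rw [foldB_some m hm xs (a + 1) x]
      simp [solGoA, hm]
      ring

theorem solution_spec : Claim_equal_solution := by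
  intro n m section_ _ hpre
  unfold Spec_solution solution solution_alt
  rcases section_ with _ | ⟨e, rest⟩
  · simp [solGoA]
  · rcases hpre with h | hm
    · cases h
    · simp only [List.foldl_cons, stepB, solGoA, if_pos hm]
      rw [foldB_some m hm rest (0+1) e]
      ring
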